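-- pv_equiv track=rewrite | github.com/Yawn-Sean/Daily_CF_Problems | daily_problems/2025/09/0902/personal_submission/cf549d_liryc.py | solve
-- ===== SOURCE A (Python) =====
-- def solve(n: int, m: int, grid: list[list[int]]) -> int:
--     ans = 0
--     for i in range(n - 1, -1, -1):
--         for j in range(m - 1, -1, -1):
--             c = grid[i][j]
--             if i < n - 1:
--                 c -= grid[i + 1][j]
--             if j < m - 1:
--                 c -= grid[i][j + 1]
--             if i < n - 1 and j < m - 1:
--                 c += grid[i + 1][j + 1]
--             if c != 0:
--                 ans += 1
--     return ans
-- ===== SOURCE B (Python) =====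
-- def _row_mismatches(row, below):
--     return sum(1 for a, b in zip(row, below) if a != b)
--
--
-- def _nonzeros(row):
--     return sum(1 for a in row if a != 0)
--
--
-- def solve(n: int, m: int, grid: list[list[int]]) -> int:
--     # Two separable passes: row-wise differences first, then column-wise by
--     # comparing adjacent rows of the table (the last row against zeros).
--     R = [[grid[i][j] - (grid[i][j + 1] if j + 1 < m else 0) for j in range(m)]
--          for i in range(n)]
--     ans = 0
--     for row, below in zip(R, R[1:]):
--         ans += _row_mismatches(row, below)
--     if R:
--         ans += _nonzeros(R[-1])
--     return ans
-- ===== Notes on version B (the rewrite author's own statement) =====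
-- stated objective: alternative
-- what changed: A's single reverse pass computing each 2D-difference cell from four boundary-guarded grid reads is replaced by two forward passes: build a row-wise difference table R, then zip each row of R with the row below (zeros below the last) and count mismatched pairs.
import Mathlib
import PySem

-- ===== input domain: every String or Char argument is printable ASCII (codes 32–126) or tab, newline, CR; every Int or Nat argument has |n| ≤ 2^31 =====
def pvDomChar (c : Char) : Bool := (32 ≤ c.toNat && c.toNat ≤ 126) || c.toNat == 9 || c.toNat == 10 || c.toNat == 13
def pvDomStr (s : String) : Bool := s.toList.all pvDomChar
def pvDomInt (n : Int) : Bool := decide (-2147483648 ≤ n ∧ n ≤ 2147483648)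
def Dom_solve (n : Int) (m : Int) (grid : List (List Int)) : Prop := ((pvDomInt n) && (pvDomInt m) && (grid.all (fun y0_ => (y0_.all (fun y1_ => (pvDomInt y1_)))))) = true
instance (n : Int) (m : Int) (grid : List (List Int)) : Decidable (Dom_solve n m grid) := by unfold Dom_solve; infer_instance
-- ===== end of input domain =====

-- B replaces A's single reverse pass with inline boundary branches by two forward passes:
-- a row-difference table R, then a zip of each row of R with the row below (zeros below the last).

-- ===== PORT A =====
def solve (n : Int) (m : Int) (grid : List (List Int)) : Int :=
  (PySem.List.pyRange (n - 1) (-1) (-1)).foldl (fun ans i =>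
    (PySem.List.pyRange (m - 1) (-1) (-1)).foldl (fun ans j =>
      let c0 := PySem.List.pyGetD (PySem.List.pyGetD grid i []) j 0
      let c1 := if i < n - 1 then c0 - PySem.List.pyGetD (PySem.List.pyGetD grid (i + 1) []) j 0 else c0
      let c2 := if j < m - 1 then c1 - PySem.List.pyGetD (PySem.List.pyGetD grid i []) (j + 1) 0 else c1
      let c3 := if i < n - 1 ∧ j < m - 1 then c2 + PySem.List.pyGetD (PySem.List.pyGetD grid (i + 1) []) (j + 1) 0 else c2
      if c3 ≠ 0 then ans + 1 else ans) ans) 0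

-- ===== PORT B =====
-- helper _row_mismatches: count positions where the two rows differ
def cntRow (row below : List Int) : Int :=
  (row.zip below).foldl (fun acc q => if q.1 ≠ q.2 then acc + 1 else acc) 0

-- helper _nonzeros: count nonzero entries of a row
def cntNonzero (row : List Int) : Int :=
  row.foldl (fun acc a => if a ≠ 0 then acc + 1 else acc) 0

-- the table R of row-wise differences
def diffTable (n : Int) (m : Int) (grid : List (List Int)) : List (List Int) :=
  (PySem.List.pyRange 0 n).map (fun i =>
    (PySem.List.pyRange 0 m).map (fun j =>
      PySem.List.pyGetD (PySem.List.pyGetD grid i []) j 0 -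
        (if j + 1 < m then PySem.List.pyGetD (PySem.List.pyGetD grid i []) (j + 1) 0 else 0)))

def solve_alt (n : Int) (m : Int) (grid : List (List Int)) : Int :=
  let R := diffTable n m grid
  (R.zip (PySem.List.slice R (some 1) none)).foldl (fun ans p => ans + cntRow p.1 p.2) 0
  + (if R = [] then 0 else cntNonzero (PySem.List.pyGetD R (-1) []))

-- ===== PRECONDITION & SPEC =====
-- Pre_ excludes exactly the inputs where the Python raises IndexError: when both loop ranges are
-- nonempty, the grid must have at least n rows whose first n rows each have at least m entries.
def Pre_solve (n : Int) (m : Int) (grid : List (List Int)) : Prop :=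
  0 < n → 0 < m → n ≤ grid.length ∧ ∀ row ∈ grid.take n.toNat, m ≤ row.length
instance (n : Int) (m : Int) (grid : List (List Int)) : Decidable (Pre_solve n m grid) := by
  unfold Pre_solve; infer_instance

def pvWitness_solve : Int × Int × List (List Int) := (2, 2, [[1, 2], [3, 4]])

def Spec_solve (n : Int) (m : Int) (grid : List (List Int)) (out : Int) : Prop := out = solve_alt n m grid
instance (n : Int) (m : Int) (grid : List (List Int)) (out : Int) : Decidable (Spec_solve n m grid out) := by unfold Spec_solve; infer_instance

-- ===== CLAIM (what is proved, stated in full; the proofs are below) =====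
def Claim_equal_solve : Prop := ∀ (n : Int) (m : Int) (grid : List (List Int)), Dom_solve n m grid → Pre_solve n m grid → Spec_solve n m grid (solve n m grid)

-- ===== LEMMAS AND PROOFS =====

-- the 2D-difference cell value both programs test against zero
def cCell (n m : Int) (grid : List (List Int)) (i j : Int) : Int :=
  PySem.List.pyGetD (PySem.List.pyGetD grid i []) j 0
  - (if i < n - 1 then PySem.List.pyGetD (PySem.List.pyGetD grid (i + 1) []) j 0 else 0)
  - (if j < m - 1 then PySem.List.pyGetD (PySem.List.pyGetD grid i []) (j + 1) 0 else 0)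
  + (if i < n - 1 ∧ j < m - 1 then PySem.List.pyGetD (PySem.List.pyGetD grid (i + 1) []) (j + 1) 0 else 0)

-- the common canonical form: forward double sum of 0/1 indicators
def cnt (n m : Int) (grid : List (List Int)) : Int :=
  ((PySem.List.pyRange 0 n).map (fun i =>
    ((PySem.List.pyRange 0 m).map (fun j =>
      if cCell n m grid i j ≠ 0 then (1 : Int) else 0)).sum)).sum

lemma pyRange_rev (k : Int) : PySem.List.pyRange (k - 1) (-1) (-1) = (PySem.List.pyRange 0 k).reverse := by
  rcases le_or_gt k 0 with hk | hk
  · have h1 : PySem.List.pyRange (k - 1) (-1) (-1) = [] := by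
      simp [PySem.List.pyRange, show ¬(-1 : Int) < k - 1 from by omega]
    have h2 : PySem.List.pyRange 0 k = [] := by
      simp [PySem.List.pyRange, show ¬(0:Int) < k from not_lt.mpr hk]
    simp [h1, h2]
  · obtain ⟨N, rfl⟩ : ∃ N : Nat, k = ↑N := ⟨k.toNat, (Int.toNat_of_nonneg hk.le).symm⟩
    rw [PySem.List.pyRange_zero_natCast]
    have hlhs : PySem.List.pyRange ((N : Int) - 1) (-1) (-1)
        = (List.range N).map (fun j => (N : Int) - 1 + (-1) * ↑j) := by
      simp only [PySem.List.pyRange]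
      have hc : (-1 : Int) < (N : Int) - 1 := by omega
      simp [hc]
    rw [hlhs]
    apply List.ext_getElem
    · simp
    · intro idx h1 h2
      simp only [List.getElem_reverse, List.getElem_map, List.getElem_range,
        List.length_map, List.length_range]
      simp only [List.length_map, List.length_range] at h1 h2
      omega

lemma sum_map_rev (k : Int) (f : Int → Int) :
    ((PySem.List.pyRange (k - 1) (-1) (-1)).map f).sum = ((PySem.List.pyRange 0 k).map f).sum := by
  rw [pyRange_rev, List.map_reverse, List.sum_reverse]

lemma solve_eq_cnt (n m : Int) (grid : List (List Int)) : solve n m grid = cnt n m grid := by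
  unfold solve cnt
  have hinner : ∀ i ans : Int,
      (PySem.List.pyRange (m - 1) (-1) (-1)).foldl (fun ans j =>
        let c0 := PySem.List.pyGetD (PySem.List.pyGetD grid i []) j 0
        let c1 := if i < n - 1 then c0 - PySem.List.pyGetD (PySem.List.pyGetD grid (i + 1) []) j 0 else c0
        let c2 := if j < m - 1 then c1 - PySem.List.pyGetD (PySem.List.pyGetD grid i []) (j + 1) 0 else c1
        let c3 := if i < n - 1 ∧ j < m - 1 then c2 + PySem.List.pyGetD (PySem.List.pyGetD grid (i + 1) []) (j + 1) 0 else c2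
        if c3 ≠ 0 then ans + 1 else ans) ans
      = ans + ((PySem.List.pyRange (m - 1) (-1) (-1)).map (fun j =>
          if cCell n m grid i j ≠ 0 then (1 : Int) else 0)).sum := by
    intro i ans
    rw [PySem.List.foldl_congr_mem _ _
      (fun ans j => ans + (if cCell n m grid i j ≠ 0 then (1 : Int) else 0)) ans ?_]
    · exact PySem.List.foldl_add _ _ _
    · intro acc j _
      have hc : (let c0 := PySem.List.pyGetD (PySem.List.pyGetD grid i []) j 0
        let c1 := if i < n - 1 then c0 - PySem.List.pyGetD (PySem.List.pyGetD grid (i + 1) []) j 0 else c0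
        let c2 := if j < m - 1 then c1 - PySem.List.pyGetD (PySem.List.pyGetD grid i []) (j + 1) 0 else c1
        if i < n - 1 ∧ j < m - 1 then c2 + PySem.List.pyGetD (PySem.List.pyGetD grid (i + 1) []) (j + 1) 0 else c2)
          = cCell n m grid i j := by
        simp only [cCell]
        split_ifs <;> ring
      simp only [hc]
      split_ifs <;> ring
  rw [PySem.List.foldl_congr_mem _ _
    (fun ans i => ans + ((PySem.List.pyRange (m - 1) (-1) (-1)).map (fun j =>
      if cCell n m grid i j ≠ 0 then (1 : Int) else 0)).sum) 0 (fun acc i _ => hinner i acc)]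
  rw [PySem.List.foldl_add, zero_add, sum_map_rev]
  apply congrArg
  apply List.map_congr_left
  intro i _
  exact sum_map_rev m _

lemma cntRow_maps (m : Int) (g1 g2 : Int → Int) :
    cntRow ((PySem.List.pyRange 0 m).map g1) ((PySem.List.pyRange 0 m).map g2)
    = ((PySem.List.pyRange 0 m).map (fun j =>
        if g1 j - g2 j ≠ 0 then (1 : Int) else 0)).sum := by
  unfold cntRow
  rw [List.zip_map']
  rw [PySem.List.foldl_congr_mem _ _
    (fun acc (p : Int × Int) => acc + (if p.1 - p.2 ≠ 0 then (1 : Int) else 0)) 0 ?_]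
  · rw [PySem.List.foldl_add, zero_add, List.map_map]
    rfl
  · intro acc p _
    rcases eq_or_ne p.1 p.2 with h | h
    · simp [h]
    · simp [h, sub_ne_zero.mpr h]

lemma cntNonzero_map (m : Int) (g1 : Int → Int) :
    cntNonzero ((PySem.List.pyRange 0 m).map g1)
    = ((PySem.List.pyRange 0 m).map (fun j =>
        if g1 j ≠ 0 then (1 : Int) else 0)).sum := by
  unfold cntNonzero
  rw [PySem.List.foldl_congr_mem _ _
    (fun acc (a : Int) => acc + (if a ≠ 0 then (1 : Int) else 0)) 0 ?_]
  · rw [PySem.List.foldl_add, zero_add, List.map_map]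
    rfl
  · intro acc a _
    rcases eq_or_ne a 0 with h | h
    · simp [h]
    · simp [h]

lemma zip_adj_map (f' : Nat → List Int) :
    ∀ (N a : Nat),
    (((List.range' a (N + 1)).map f').zip (((List.range' a (N + 1)).map f').drop 1)).map
        (fun p => cntRow p.1 p.2)
    = (List.range' a N).map (fun k => cntRow (f' k) (f' (k + 1))) := by
  intro N
  induction N with
  | zero => intro a; simp [List.range'_succ]
  | succ N ih =>
    intro a
    have h1 : List.range' a (N + 1 + 1) = a :: List.range' (a + 1) (N + 1) := List.range'_succ
    have h2 : List.range' (a + 1) (N + 1) = (a + 1) :: List.range' (a + 2) N := List.range'_succ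
    have h3 : List.range' a (N + 1) = a :: List.range' (a + 1) N := List.range'_succ
    have ih' := ih (a + 1)
    rw [h2] at ih'
    rw [h1, h2, h3]
    simp only [List.map_cons, List.drop_succ_cons, List.drop_zero, List.zip_cons_cons] at ih' ⊢
    rw [ih']

lemma pyGetD_last (f' : Nat → List Int) (N : Nat) :
    PySem.List.pyGetD ((List.range' 0 (N + 1)).map f') (-1) [] = f' N := by
  have hlen : ((List.range' 0 (N + 1)).map f').length = N + 1 := by simp
  simp only [PySem.List.pyGetD, PySem.List.pyGet?, PySem.List.pyIdx?, hlen]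
  rw [if_neg (by omega), if_pos (by push_cast; omega)]
  have hN : (N + 1) - (-(-1 : Int)).toNat = N := by omega
  rw [hN]
  simp [List.getElem?_map]

lemma solve_alt_eq_cnt (n m : Int) (grid : List (List Int)) : solve_alt n m grid = cnt n m grid := by
  simp only [solve_alt]
  unfold cnt diffTable
  rw [PySem.List.foldl_add, zero_add]
  rw [PySem.List.slice_from _ (by norm_num)]
  rcases le_or_gt n 0 with hn | hn
  · have h0 : PySem.List.pyRange 0 n = [] := by
      simp [PySem.List.pyRange, not_lt.mpr hn]
    simp [h0]
  · obtain ⟨N, rfl⟩ : ∃ N : Nat, n = ↑N := ⟨n.toNat, (Int.toNat_of_nonneg hn.le).symm⟩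
    have hN : 0 < N := by exact_mod_cast hn
    obtain ⟨N', rfl⟩ : ∃ N', N = N' + 1 := ⟨N - 1, by omega⟩
    rw [PySem.List.pyRange_zero_natCast, List.range_eq_range', List.map_map, List.map_map]
    rw [show (1 : Int).toNat = 1 from rfl]
    rw [zip_adj_map]
    rw [if_neg (by simp [List.range'_succ])]
    rw [pyGetD_last]
    rw [show List.range' 0 (N' + 1) = List.range' 0 N' ++ [0 + 1 * N'] from List.range'_concat]
    simp only [Nat.zero_add, Nat.one_mul]
    rw [List.map_append, List.sum_append]
    congr 1
    · apply congrArg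
      apply List.map_congr_left
      intro k hk
      simp only [Function.comp_apply]
      obtain ⟨i, hiN, hke⟩ := List.mem_range'.mp hk
      have hkN : k < N' := by omega
      rw [cntRow_maps]
      apply congrArg
      apply List.map_congr_left
      intro j hj
      have hcell : (PySem.List.pyGetD (PySem.List.pyGetD grid (↑k) []) j 0
          - (if j + 1 < m then PySem.List.pyGetD (PySem.List.pyGetD grid (↑k) []) (j + 1) 0 else 0))
          - (PySem.List.pyGetD (PySem.List.pyGetD grid ((↑k : Int) + 1) []) j 0
          - (if j + 1 < m then PySem.List.pyGetD (PySem.List.pyGetD grid ((↑k : Int) + 1) []) (j + 1) 0 else 0))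
          = cCell (↑(N' + 1)) m grid (↑k) j := by
        simp only [cCell]
        split_ifs <;> omega
      rw [show ((↑(k + 1) : Int)) = (↑k : Int) + 1 from by push_cast; ring]
      rw [hcell]
    · simp only [List.map_cons, List.map_nil, List.sum_cons, List.sum_nil, add_zero,
        Function.comp_apply]
      rw [cntNonzero_map]
      apply congrArg
      apply List.map_congr_left
      intro j hj
      have hcell : (PySem.List.pyGetD (PySem.List.pyGetD grid (↑N') []) j 0
          - (if j + 1 < m then PySem.List.pyGetD (PySem.List.pyGetD grid (↑N') []) (j + 1) 0 else 0))
          = cCell (↑(N' + 1)) m grid (↑N') j := by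
        simp only [cCell]
        split_ifs <;> omega
      rw [hcell]

-- ===== VERDICT (by name: the statement is the Claim_ definition above) =====
theorem solve_spec : Claim_equal_solve := by
  intro n m grid _ _
  unfold Spec_solve
  rw [solve_eq_cnt, solve_alt_eq_cnt]
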